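-- pv_equiv track=rewrite | github.com/freehci/freehci-appliance | backend/app/services/snmp_mib_parse.py | _mib_text_mask_strings_and_comments
-- ===== SOURCE A (Python) =====
-- def _mib_text_mask_strings_and_comments(mib_text: str) -> str:
--     """Erstatt strenger og linjekommentarer slik at «FROM Modul» kun matches i ekte syntaks.
--
--     Ukommenterte linjer som «-- ... FROM COMPAQ» ga tidligere falske importer. Tekst i
--     hermetegn (f.eks. DESCRIPTION) maskeres slik at ord som «from»/«FROM» i fritekst ikke
--     brukes som modulnavn. ASN.1 bruker «""» som escapet anførselstegn i strenger.
--     """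
--     out: list[str] = []
--     i = 0
--     n = len(mib_text)
--     while i < n:
--         c = mib_text[i]
--         if c == '"':
--             out.append(" ")
--             i += 1
--             while i < n:
--                 if mib_text[i] == '"' and i + 1 < n and mib_text[i + 1] == '"':
--                     i += 2
--                     continue
--                 if mib_text[i] == '"':
--                     i += 1
--                     break
--                 i += 1
--             continue
--         if c == "-" and i + 1 < n and mib_text[i + 1] == "-":
--             while i < n and mib_text[i] != "\n":
--                 i += 1
--             if i < n:
--                 out.append("\n")
--                 i += 1
--             continue
--         out.append(c)
--         i += 1
--     return "".join(out)
-- ===== SOURCE B (Python) =====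
-- def _normal(c, out):
--     if c == '"':
--         out.append(" ")
--         return "string"
--     if c == "-":
--         return "dash"
--     out.append(c)
--     return "normal"
--
--
-- def _mib_text_mask_strings_and_comments(mib_text: str) -> str:
--     """Single flat pass: an explicit 5-state DFA (normal/string/quote/dash/comment)
--     replaces the nested index-advancing while loops; no index arithmetic or lookahead."""
--     out = []
--     state = "normal"
--     for c in mib_text:
--         if state == "string":
--             if c == '"':
--                 state = "quote"
--         elif state == "quote":
--             state = "string" if c == '"' else _normal(c, out)
--         elif state == "comment":
--             if c == "\n":
--                 out.append("\n")
--                 state = "normal"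
--         elif state == "dash":
--             if c == "-":
--                 state = "comment"
--             else:
--                 out.append("-")
--                 state = _normal(c, out)
--         else:
--             state = _normal(c, out)
--     if state == "dash":
--         out.append("-")
--     return "".join(out)
-- ===== Notes on version B (the rewrite author's own statement) =====
-- stated objective: alternative
-- what changed: Replaced the nested index-advancing while loops with lookahead by a single flat pass: an explicit five-state DFA (normal/string/quote/dash/comment) driven by one for-loop over the characters, with a final flush for a pending dash.
import Mathlib
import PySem

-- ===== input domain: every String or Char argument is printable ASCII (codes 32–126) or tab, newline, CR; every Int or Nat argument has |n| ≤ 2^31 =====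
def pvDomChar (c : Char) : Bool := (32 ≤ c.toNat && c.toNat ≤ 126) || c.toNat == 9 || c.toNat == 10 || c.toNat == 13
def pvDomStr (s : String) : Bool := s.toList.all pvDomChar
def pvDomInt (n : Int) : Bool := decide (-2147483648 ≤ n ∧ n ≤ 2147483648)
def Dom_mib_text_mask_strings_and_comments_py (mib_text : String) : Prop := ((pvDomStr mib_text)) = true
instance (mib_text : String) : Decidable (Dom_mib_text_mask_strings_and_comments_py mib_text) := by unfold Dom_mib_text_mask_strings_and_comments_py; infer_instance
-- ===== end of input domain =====

-- B replaces A's nested index-advancing scanner by a single flat five-state DFA pass (alternative decomposition, same O(n) cost).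

-- ===== PORT A =====
-- A's inner string-skipping while loop: after the opening '"', skip past "" pairs until a lone '"' or EOF
def aSkipStr : List Char → List Char
  | [] => []
  | '"' :: '"' :: rest => aSkipStr rest
  | '"' :: rest => rest
  | _ :: rest => aSkipStr rest

-- needed by maskA's termination (the inner loop never lengthens the remaining input)
theorem aSkipStr_length_le (l : List Char) : (aSkipStr l).length ≤ l.length := by
  induction l using aSkipStr.induct <;> simp [aSkipStr] <;> omega

mutual
-- A's outer while loop
def maskA : List Char → List Char
  | [] => []
  | '"' :: rest => ' ' :: maskA (aSkipStr rest)
  | '-' :: '-' :: rest => maskACmt rest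
  | c :: rest => c :: maskA rest
termination_by l => l.length
decreasing_by
  all_goals simp only [List.length_cons]
  all_goals first
    | omega
    | exact Nat.lt_succ_of_le (aSkipStr_length_le _)
-- A's inner comment while loop: skip to '\n'; if found, emit '\n' and resume the outer loop
def maskACmt : List Char → List Char
  | [] => []
  | '\n' :: rest => '\n' :: maskA rest
  | _ :: rest => maskACmt rest
termination_by l => l.length
decreasing_by
  all_goals simp only [List.length_cons]
  all_goals omega
end

def mib_text_mask_strings_and_comments_py (mib_text : String) : String :=
  String.ofList (maskA mib_text.toList)

-- ===== PORT B =====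
inductive BSt
  | norm | instr | quote | dash | comment
deriving DecidableEq

-- B's helper `_normal`: handle one character in the normal state
def bNormal (c : Char) (out : List Char) : BSt × List Char :=
  if c = '"' then (.instr, out ++ [' '])
  else if c = '-' then (.dash, out)
  else (.norm, out ++ [c])

-- one DFA transition (B's loop body)
def bStep : BSt × List Char → Char → BSt × List Char
  | (.instr, out), c => (if c = '"' then .quote else .instr, out)
  | (.quote, out), c => if c = '"' then (.instr, out) else bNormal c out
  | (.comment, out), c => if c = '\n' then (.norm, out ++ ['\n']) else (.comment, out)
  | (.dash, out), c => if c = '-' then (.comment, out) else bNormal c (out ++ ['-'])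
  | (.norm, out), c => bNormal c out

-- B's final flush of a pending dash
def bFlush : BSt × List Char → List Char
  | (.dash, out) => out ++ ['-']
  | (_, out) => out

def mib_text_mask_strings_and_comments_py_alt (mib_text : String) : String :=
  String.ofList (bFlush (mib_text.toList.foldl bStep (.norm, [])))

-- ===== PRECONDITION & SPEC =====
def Spec_mib_text_mask_strings_and_comments_py (mib_text : String) (out : String) : Prop := out = mib_text_mask_strings_and_comments_py_alt mib_text
instance (mib_text : String) (out : String) : Decidable (Spec_mib_text_mask_strings_and_comments_py mib_text out) := by unfold Spec_mib_text_mask_strings_and_comments_py; infer_instance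

-- ===== CLAIM (what is proved, stated in full; the proofs are below) =====
def Claim_equal_mib_text_mask_strings_and_comments_py : Prop := ∀ (mib_text : String), Dom_mib_text_mask_strings_and_comments_py mib_text → Spec_mib_text_mask_strings_and_comments_py mib_text (mib_text_mask_strings_and_comments_py mib_text)

-- ===== LEMMAS AND PROOFS =====
-- what A still produces from the rest of the input, as a function of B's current DFA state
def specSt : BSt → List Char → List Char
  | .norm, cs => maskA cs
  | .instr, cs => maskA (aSkipStr cs)
  | .quote, cs => if cs.head? = some '"' then maskA (aSkipStr cs.tail) else maskA cs
  | .dash, cs => maskA ('-' :: cs)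
  | .comment, cs => maskACmt cs

theorem maskA_cons_other (c : Char) (rest : List Char) (hq : c ≠ '"')
    (hd : c = '-' → rest.head? ≠ some '-') : maskA (c :: rest) = c :: maskA rest := by
  match c, rest with
  | c, [] =>
    by_cases h : c = '-'
    · subst h; simp [maskA]
    · simp [maskA]
  | c, c2 :: r2 =>
    by_cases h : c = '-'
    · subst h
      have h2 : c2 ≠ '-' := by simpa using hd rfl
      simp [maskA, h2]
    · simp [maskA, h]

theorem runB_eq_specSt : ∀ (cs : List Char) (st : BSt) (out : List Char),
    bFlush (cs.foldl bStep (st, out)) = out ++ specSt st cs := by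
  intro cs
  induction cs with
  | nil =>
    intro st out
    cases st <;> simp [specSt, bFlush, maskA, maskACmt, aSkipStr]
  | cons c rest ih =>
    intro st out
    have hb : ∀ (c : Char) (out : List Char),
        bFlush (List.foldl bStep (bNormal c out) rest) = out ++ maskA (c :: rest) := by
      intro c out
      by_cases hq : c = '"'
      · subst hq; simp [bNormal, ih, specSt, maskA]
      · by_cases hd : c = '-'
        · subst hd
          have h1 : bNormal '-' out = (BSt.dash, out) := by simp [bNormal]
          rw [h1, ih]; simp [specSt]
        · have h1 : bNormal c out = (BSt.norm, out ++ [c]) := by simp [bNormal, hq, hd]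
          rw [h1, ih]
          rw [maskA_cons_other c rest hq (by simp [hd])]
          simp [specSt]
    simp only [List.foldl_cons]
    cases st with
    | norm =>
      have h1 : bStep (BSt.norm, out) c = bNormal c out := by simp [bStep]
      rw [h1, hb]; simp [specSt]
    | instr =>
      by_cases hq : c = '"'
      · subst hq
        have h1 : bStep (BSt.instr, out) '"' = (BSt.quote, out) := by simp [bStep]
        rw [h1, ih]
        match rest with
        | [] => simp [specSt, aSkipStr]
        | '"' :: r2 => simp [specSt, aSkipStr]
        | c2 :: r2 =>
          by_cases h2 : c2 = '"'
          · subst h2; simp [specSt, aSkipStr]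
          · simp [specSt, aSkipStr, h2]
      · have h1 : bStep (BSt.instr, out) c = (BSt.instr, out) := by simp [bStep, hq]
        rw [h1, ih]
        have h2 : aSkipStr (c :: rest) = aSkipStr rest := by
          match rest with
          | [] => simp [aSkipStr]
          | c2 :: r2 => simp [aSkipStr, hq]
        simp [specSt, h2]
    | quote =>
      by_cases hq : c = '"'
      · subst hq
        have h1 : bStep (BSt.quote, out) '"' = (BSt.instr, out) := by simp [bStep]
        rw [h1, ih]; simp [specSt]
      · have h1 : bStep (BSt.quote, out) c = bNormal c out := by simp [bStep, hq]
        rw [h1, hb]; simp [specSt, hq]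
    | dash =>
      by_cases hd : c = '-'
      · subst hd
        have h1 : bStep (BSt.dash, out) '-' = (BSt.comment, out) := by simp [bStep]
        rw [h1, ih]; simp [specSt, maskA]
      · have h1 : bStep (BSt.dash, out) c = bNormal c (out ++ ['-']) := by simp [bStep, hd]
        rw [h1, hb]
        have h2 : maskA ('-' :: c :: rest) = '-' :: maskA (c :: rest) := by simp [maskA, hd]
        simp [specSt, h2]
    | comment =>
      by_cases hn : c = '\n'
      · subst hn
        have h1 : bStep (BSt.comment, out) '\n' = (BSt.norm, out ++ ['\n']) := by simp [bStep]
        rw [h1, ih]; simp [specSt, maskACmt]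
      · have h1 : bStep (BSt.comment, out) c = (BSt.comment, out) := by simp [bStep, hn]
        rw [h1, ih]; simp [specSt, maskACmt]

-- ===== VERDICT (by name: the statement is the Claim_ definition above) =====
theorem mib_text_mask_strings_and_comments_py_spec : Claim_equal_mib_text_mask_strings_and_comments_py := by
  intro s _
  unfold Spec_mib_text_mask_strings_and_comments_py
  unfold mib_text_mask_strings_and_comments_py mib_text_mask_strings_and_comments_py_alt
  rw [runB_eq_specSt]
  simp [specSt]
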